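-- pv_equiv track=rewrite | github.com/zeyangwang42/SmartResumeAI | resume_builder.py | extract_match_summary
-- ===== SOURCE A (Python) =====
-- def extract_match_summary(analysis_text: str) -> str:
--     if not analysis_text:
--         return "No analysis yet."
--
--     lines = [line.strip() for line in analysis_text.splitlines() if line.strip()]
--     capture = False
--     collected = []
--
--     for line in lines:
--         if line.lower().startswith("match score"):
--             capture = True
--             continue
--
--         if capture:
--             if any(
--                 line.lower().startswith(section.lower())
--                 for section in [
--                     "strengths",
--                     "missing skills",
--                     "improvement suggestions",
--                     "rewritten resume bullets",
--                 ]
--             ):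
--                 break
--             collected.append(line)
--
--     if collected:
--         return " ".join(collected)[:240]
--
--     return "Resume-to-job match summary will appear here after analysis."
-- ===== SOURCE B (Python) =====
-- def extract_match_summary(analysis_text: str) -> str:
--     if not analysis_text:
--         return "No analysis yet."
--
--     lines = [line.strip() for line in analysis_text.splitlines() if line.strip()]
--
--     # Index-set formulation: positions of 'match score' lines and of section-header
--     # lines (a 'match score' line is never a section boundary, matching A's precedence).
--     score_idx = [i for i, line in enumerate(lines)
--                  if line.lower().startswith("match score")]
--     header_idx = [i for i, line in enumerate(lines)
--                   if not line.lower().startswith("match score")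
--                   and line.lower().startswith((
--                       "strengths",
--                       "missing skills",
--                       "improvement suggestions",
--                       "rewritten resume bullets",
--                   ))]
--
--     collected = []
--     if score_idx:
--         start = score_idx[0]
--         after = [i for i in header_idx if i > start]
--         stop = min(after) if after else len(lines)
--         collected = [line for i, line in enumerate(lines)
--                      if start < i < stop and i not in score_idx]
--
--     if collected:
--         return " ".join(collected)[:240]
--
--     return "Resume-to-job match summary will appear here after analysis."
-- ===== Notes on version B (the rewrite author's own statement) =====
-- stated objective: alternative
-- what changed: Replaced A's sequential capture-flag state machine (continue/break) by an index-set formulation: compute the index sets of 'match score' lines and of section-header lines, take start = min score index and stop = min header index past start, and collect the non-score lines strictly between them by an arithmetic filter.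
import Mathlib
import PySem

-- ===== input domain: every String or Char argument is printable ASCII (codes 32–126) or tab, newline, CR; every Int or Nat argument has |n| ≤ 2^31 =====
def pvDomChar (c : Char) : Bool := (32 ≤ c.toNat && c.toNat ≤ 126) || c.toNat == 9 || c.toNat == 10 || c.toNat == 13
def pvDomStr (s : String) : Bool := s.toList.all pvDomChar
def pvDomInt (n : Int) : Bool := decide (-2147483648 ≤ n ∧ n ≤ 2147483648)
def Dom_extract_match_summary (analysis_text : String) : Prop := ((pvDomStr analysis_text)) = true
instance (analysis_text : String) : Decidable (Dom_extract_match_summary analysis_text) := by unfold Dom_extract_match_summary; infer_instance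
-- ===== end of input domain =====

-- B replaces A's sequential capture-flag state machine by an index-set formulation
-- (score/header index lists, start = first score index, stop = min header index past
-- start, arithmetic filter between them); same task, different algorithm ('alternative').

-- ===== PORT A =====
def pvA_sections : List String :=
  ["strengths", "missing skills", "improvement suggestions", "rewritten resume bullets"]

-- A's for-loop with its capture flag, break and continue, as structural recursion
def pvA_loop : List String → Bool → List String → List String
  | [], _, collected => collected
  | line :: rest, capture, collected =>
    if PySem.Str.startswith (PySem.Str.lower line) "match score" then
      pvA_loop rest true collected
    else if capture then
      if pvA_sections.any (fun sec =>
          PySem.Str.startswith (PySem.Str.lower line) (PySem.Str.lower sec)) then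
        collected
      else
        pvA_loop rest capture (collected ++ [line])
    else
      pvA_loop rest capture collected

def extract_match_summary (analysis_text : String) : String :=
  if PySem.Str.len analysis_text == 0 then "No analysis yet."
  else
    let lines := ((PySem.Str.splitlines analysis_text).filter
        (fun line => PySem.Str.len (PySem.Str.strip line) != 0)).map PySem.Str.strip
    let collected := pvA_loop lines false []
    if collected.isEmpty then
      "Resume-to-job match summary will appear here after analysis."
    else
      PySem.Str.slice (PySem.Str.join " " collected) none (some 240)

-- ===== PORT B =====
-- B: line.lower().startswith("match score")
def pvB_isScore (line : String) : Bool :=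
  PySem.Str.startswith (PySem.Str.lower line) "match score"

-- B: not line.lower().startswith("match score") and line.lower().startswith((...headers...))
def pvB_isHeader (line : String) : Bool :=
  !pvB_isScore line &&
    (["strengths", "missing skills", "improvement suggestions",
      "rewritten resume bullets"] : List String).any
      (fun h => PySem.Str.startswith (PySem.Str.lower line) h)

def extract_match_summary_alt (analysis_text : String) : String :=
  if PySem.Str.len analysis_text == 0 then "No analysis yet."
  else
    let lines := ((PySem.Str.splitlines analysis_text).filter
        (fun line => PySem.Str.len (PySem.Str.strip line) != 0)).map PySem.Str.strip
    -- score_idx = [i for i, line in enumerate(lines) if ...]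
    let scoreIdx := ((PySem.List.enumerate lines).filter
        (fun p => pvB_isScore p.2)).map Prod.fst
    let headerIdx := ((PySem.List.enumerate lines).filter
        (fun p => pvB_isHeader p.2)).map Prod.fst
    let collected :=
      match scoreIdx with
      | [] => ([] : List String)
      | start :: _ =>
        let after := headerIdx.filter (fun i => decide (start < i))
        let stop : Int :=
          match PySem.List.min? after (fun x => x) with
          | some m => m
          | none => (lines.length : Int)
        ((PySem.List.enumerate lines).filter
            (fun p => decide (start < p.1) && decide (p.1 < stop)
              && !(scoreIdx.contains p.1))).map Prod.snd
    if collected.isEmpty then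
      "Resume-to-job match summary will appear here after analysis."
    else
      PySem.Str.slice (PySem.Str.join " " collected) none (some 240)

-- ===== PRECONDITION & SPEC =====
def Spec_extract_match_summary (analysis_text : String) (out : String) : Prop := out = extract_match_summary_alt analysis_text
instance (analysis_text : String) (out : String) : Decidable (Spec_extract_match_summary analysis_text out) := by unfold Spec_extract_match_summary; infer_instance

-- ===== CLAIM (what is proved, stated in full; the proofs are below) =====
def Claim_equal_extract_match_summary : Prop := ∀ (analysis_text : String), Dom_extract_match_summary analysis_text → Spec_extract_match_summary analysis_text (extract_match_summary analysis_text)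

-- ===== LEMMAS AND PROOFS =====

-- what A collects once the capture flag is set
def pvCollect : List String → List String
  | [] => []
  | l :: r =>
    if pvB_isScore l then pvCollect r
    else if pvB_isHeader l then []
    else l :: pvCollect r

-- score / header index lists starting at offset s
def pvSIdx (lines : List String) (s : Int) : List Int :=
  ((PySem.List.enumerate lines s).filter (fun p => pvB_isScore p.2)).map Prod.fst

def pvHIdx (lines : List String) (s : Int) : List Int :=
  ((PySem.List.enumerate lines s).filter (fun p => pvB_isHeader p.2)).map Prod.fst

theorem pvLower_lit1 : PySem.Str.lower "strengths" = "strengths" := by decide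
theorem pvLower_lit2 : PySem.Str.lower "missing skills" = "missing skills" := by decide
theorem pvLower_lit3 : PySem.Str.lower "improvement suggestions" = "improvement suggestions" := by decide
theorem pvLower_lit4 : PySem.Str.lower "rewritten resume bullets" = "rewritten resume bullets" := by decide

theorem pvSections_eq (x : String) :
    (pvA_sections.any fun sec => PySem.Str.startswith x (PySem.Str.lower sec)) =
    ((["strengths", "missing skills", "improvement suggestions",
        "rewritten resume bullets"] : List String).any
      (fun h => PySem.Str.startswith x h)) := by
  simp only [pvA_sections, List.any_cons, List.any_nil, pvLower_lit1, pvLower_lit2, pvLower_lit3,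
    pvLower_lit4]

theorem pvA_loop_true (lines : List String) (acc : List String) :
    pvA_loop lines true acc = acc ++ pvCollect lines := by
  induction lines generalizing acc with
  | nil => simp [pvA_loop, pvCollect]
  | cons line rest ih =>
    simp only [pvA_loop, pvCollect, pvB_isScore, pvB_isHeader, pvSections_eq]
    split_ifs with h1 h2 <;> simp_all

theorem pvSIdx_cons (l : String) (rest : List String) (s : Int) :
    pvSIdx (l :: rest) s =
      (if pvB_isScore l then [s] else []) ++ pvSIdx rest (s + 1) := by
  simp [pvSIdx, PySem.List.enumerate_cons]
  split_ifs <;> simp_all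

theorem pvHIdx_cons (l : String) (rest : List String) (s : Int) :
    pvHIdx (l :: rest) s =
      (if pvB_isHeader l then [s] else []) ++ pvHIdx rest (s + 1) := by
  simp [pvHIdx, PySem.List.enumerate_cons]
  split_ifs <;> simp_all

theorem pvSIdx_ge (lines : List String) (s : Int) :
    ∀ i ∈ pvSIdx lines s, s ≤ i := by
  intro i hi
  simp only [pvSIdx, List.mem_map, List.mem_filter] at hi
  obtain ⟨p, ⟨hp, -⟩, rfl⟩ := hi
  rw [PySem.List.mem_enumerate_iff] at hp
  obtain ⟨k, hk, rfl⟩ := hp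
  simp

theorem pvHIdx_ge (lines : List String) (s : Int) :
    ∀ i ∈ pvHIdx lines s, s ≤ i := by
  intro i hi
  simp only [pvHIdx, List.mem_map, List.mem_filter] at hi
  obtain ⟨p, ⟨hp, -⟩, rfl⟩ := hi
  rw [PySem.List.mem_enumerate_iff] at hp
  obtain ⟨k, hk, rfl⟩ := hp
  simp

theorem pvFoldl_min_of_le (L : List Int) (a : Int) (h : ∀ y ∈ L, a ≤ y) :
    L.foldl min a = a := by
  induction L generalizing a with
  | nil => rfl
  | cons y L ih =>
    simp only [List.foldl_cons]
    rw [min_eq_left (h y (by simp))]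
    exact ih a (fun z hz => h z (by simp [hz]))

-- the window [·, stop) with score lines removed = A's collect
theorem pvCollect_eq_window (rest : List String) (t : Int) :
    pvCollect rest =
      (((PySem.List.enumerate rest t).filter
          (fun p => decide (p.1 <
              (match PySem.List.min? (pvHIdx rest t) (fun x => x) with
               | some m => m
               | none => t + rest.length))
            && !((pvSIdx rest t).contains p.1))).map Prod.snd) := by
  induction rest generalizing t with
  | nil => simp [pvCollect, pvSIdx, pvHIdx, PySem.List.enumerate_nil, PySem.List.min?]
  | cons x xs ih =>
    by_cases hs : pvB_isScore x
    · -- score line: skipped on both sides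
      have hh : pvB_isHeader x = false := by simp [pvB_isHeader, hs]
      have hS : pvSIdx (x :: xs) t = t :: pvSIdx xs (t + 1) := by
        rw [pvSIdx_cons, if_pos hs, List.singleton_append]
      have hH : pvHIdx (x :: xs) t = pvHIdx xs (t + 1) := by
        rw [pvHIdx_cons, if_neg (by simp [hh]), List.nil_append]
      have hL : pvCollect (x :: xs) = pvCollect xs := by
        simp [pvCollect, hs]
      have hSTOP :
          (match PySem.List.min? (pvHIdx (x :: xs) t) (fun x => x) with
           | some m => m | none => t + ((x :: xs) : List String).length) =
          (match PySem.List.min? (pvHIdx xs (t + 1)) (fun x => x) with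
           | some m => m | none => (t + 1) + (xs : List String).length) := by
        rw [hH]
        cases hm : PySem.List.min? (pvHIdx xs (t + 1)) (fun x => x) with
        | none => push_cast [List.length_cons]; ring
        | some m => rfl
      rw [hL, ih (t + 1)]
      simp only [hS, hSTOP, PySem.List.enumerate_cons, List.filter_cons]
      have hdrop : (decide ((t : Int) <
            (match PySem.List.min? (pvHIdx xs (t + 1)) (fun x => x) with
             | some m => m | none => (t + 1) + (xs : List String).length)) &&
          !((t :: pvSIdx xs (t + 1)).contains t)) = false := by
        simp
      rw [hdrop]
      simp only [Bool.false_eq_true, if_false]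
      apply congrArg
      apply List.filter_congr
      intro p hp
      rw [PySem.List.mem_enumerate_iff] at hp
      obtain ⟨k, hk, rfl⟩ := hp
      have hne : ¬ ((t + 1 + (k : Int)) == t) = true := by simp; omega
      simp only [List.contains_cons]
      simp [hne]
    · by_cases hh : pvB_isHeader x
      · -- header line: stop = t, window empty
        simp only [pvCollect, hs, hh, if_true, pvHIdx_cons, List.singleton_append]
        have hmin : PySem.List.min? (t :: pvHIdx xs (t + 1)) (fun x => x) = some t := by
          rw [PySem.List.min?_id_cons]
          rw [pvFoldl_min_of_le _ t (fun y hy => by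
            have := pvHIdx_ge xs (t + 1) y hy; omega)]
        rw [hmin]
        have hall : ∀ p ∈ PySem.List.enumerate (x :: xs) t,
            (decide (p.1 < t) && !((pvSIdx (x :: xs) t).contains p.1)) = false := by
          intro p hp
          rw [PySem.List.mem_enumerate_iff] at hp
          obtain ⟨k, hk, rfl⟩ := hp
          have : ¬ (t + (k : Int) < t) := by omega
          simp [this]
        have hnil : ((PySem.List.enumerate (x :: xs) t).filter
            (fun p => decide (p.1 < t) && !((pvSIdx (x :: xs) t).contains p.1))) = [] :=
          List.filter_eq_nil_iff.mpr (fun p hp => by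
            simp only [hall p hp]; exact Bool.false_ne_true)
        rw [hnil]
        rfl
      · -- ordinary line: kept on both sides
        have hstop :
            (match PySem.List.min? (pvHIdx (x :: xs) t) (fun x => x) with
             | some m => m | none => t + ((x :: xs) : List String).length) =
            (match PySem.List.min? (pvHIdx xs (t + 1)) (fun x => x) with
             | some m => m | none => (t + 1) + (xs : List String).length) := by
          rw [pvHIdx_cons, if_neg hh, List.nil_append]
          cases hm : PySem.List.min? (pvHIdx xs (t + 1)) (fun x => x) with
          | none => push_cast [List.length_cons]; ring
          | some m => rfl
        have hsidx : pvSIdx (x :: xs) t = pvSIdx xs (t + 1) := by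
          rw [pvSIdx_cons, if_neg hs]; simp
        simp only [pvCollect, hs, hh, PySem.List.enumerate_cons,
          List.filter_cons, hstop, hsidx]
        have hstop_gt :
            t < (match PySem.List.min? (pvHIdx xs (t + 1)) (fun x => x) with
                 | some m => m | none => (t + 1) + (xs : List String).length) := by
          cases hm : PySem.List.min? (pvHIdx xs (t + 1)) (fun x => x) with
          | none =>
            show t < (t + 1) + ((xs : List String).length : Int)
            omega
          | some m =>
            have h1 := PySem.List.min?_mem hm
            have h2 := pvHIdx_ge xs (t + 1) m h1
            show t < m
            omega
        have hnc : ((pvSIdx xs (t + 1)).contains t) = false := by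
          by_contra hc
          simp only [Bool.not_eq_false] at hc
          rw [List.contains_iff_mem] at hc
          have := pvSIdx_ge xs (t + 1) t hc
          omega
        simp only [hnc, Bool.not_false, Bool.and_true, hstop_gt, decide_true, if_true, List.map_cons]
        rw [ih (t + 1)]
        simp only [Bool.false_eq_true, if_false]

-- A's full loop from the idle state = B's index-set computation
theorem pvA_eq_idx (lines : List String) (s : Int) :
    pvA_loop lines false [] =
      (match pvSIdx lines s with
       | [] => ([] : List String)
       | start :: _ =>
         let stop : Int :=
           match PySem.List.min? ((pvHIdx lines s).filter (fun i => decide (start < i)))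
               (fun x => x) with
           | some m => m
           | none => (lines.length : Int) + s
         ((PySem.List.enumerate lines s).filter
             (fun p => decide (start < p.1) && decide (p.1 < stop)
               && !((pvSIdx lines s).contains p.1))).map Prod.snd) := by
  induction lines generalizing s with
  | nil => simp [pvA_loop, pvSIdx, PySem.List.enumerate_nil]
  | cons l rest ih =>
    by_cases hs : pvB_isScore l
    · -- transition: capture starts at index s
      have hh : pvB_isHeader l = false := by simp [pvB_isHeader, hs]
      have hA : pvA_loop (l :: rest) false [] = pvCollect rest := by
        simp only [pvA_loop]
        rw [if_pos (by simpa [pvB_isScore] using hs)]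
        simpa using pvA_loop_true rest []
      rw [hA, pvSIdx_cons, hs, pvHIdx_cons, hh]
      simp only [if_true, Bool.false_eq_true, if_false, List.singleton_append,
        List.nil_append]
      -- after = HIdx rest (s+1) (all its elements exceed s)
      have hafter : (pvHIdx rest (s + 1)).filter (fun i => decide (s < i)) =
          pvHIdx rest (s + 1) := by
        apply List.filter_eq_self.mpr
        intro i hi
        have := pvHIdx_ge rest (s + 1) i hi
        simp; omega
      rw [hafter, pvCollect_eq_window rest (s + 1)]
      have hlen : ((l :: rest : List String).length : Int) + s = (s + 1) + (rest.length : Int) := by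
        simp; omega
      rw [hlen]
      simp only [PySem.List.enumerate_cons, List.filter_cons, lt_self_iff_false,
        decide_false, Bool.false_and]
      apply congrArg
      apply List.filter_congr
      intro p hp
      rw [PySem.List.mem_enumerate_iff] at hp
      obtain ⟨k, hk, rfl⟩ := hp
      have h1 : (s < s + 1 + (k : Int)) := by omega
      have h2 : ¬ ((s + 1 + (k : Int)) == s) = true := by simp; omega
      simp only [List.contains_cons, h1, decide_true, Bool.true_and]
      simp [h2]
    · -- idle: both sides skip l
      have hA : pvA_loop (l :: rest) false [] = pvA_loop rest false [] := by
        simp only [pvA_loop]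
        rw [if_neg (by simpa [pvB_isScore] using hs)]
        simp
      rw [hA, ih (s + 1), pvSIdx_cons, if_neg hs, List.nil_append]
      cases hsi : pvSIdx rest (s + 1) with
      | nil => simp
      | cons start tl =>
        have hstart : s + 1 ≤ start := pvSIdx_ge rest (s + 1) start (by simp [hsi])
        simp only []
        have hhf : (pvHIdx (l :: rest) s).filter (fun i => decide (start < i)) =
            (pvHIdx rest (s + 1)).filter (fun i => decide (start < i)) := by
          rw [pvHIdx_cons]
          cases hhl : pvB_isHeader l
          · simp
          · simp only [if_true, List.singleton_append, List.filter_cons]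
            have : ¬ (start < s) := by omega
            simp [this]
        have hlen : ((l :: rest : List String).length : Int) + s = ((rest : List String).length : Int) + (s + 1) := by
          simp; omega
        rw [hhf, hlen]
        simp only [PySem.List.enumerate_cons, List.filter_cons]
        have : ¬ (start < s) := by omega
        simp [this]

-- ===== VERDICT (by name: the statement is the Claim_ definition above) =====
theorem extract_match_summary_spec : Claim_equal_extract_match_summary := by
  intro analysis_text _
  unfold Spec_extract_match_summary extract_match_summary extract_match_summary_alt
  by_cases h : (PySem.Str.len analysis_text == 0) = true
  · rw [if_pos h, if_pos h]
  · rw [if_neg h, if_neg h]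
    set lines := ((PySem.Str.splitlines analysis_text).filter
        (fun line => PySem.Str.len (PySem.Str.strip line) != 0)).map PySem.Str.strip with hl
    have hz : ((lines.length : Int) + (0 : Int)) = (lines.length : Int) := by omega
    have hmain := pvA_eq_idx lines 0
    rw [hz] at hmain
    simp only [pvSIdx, pvHIdx] at hmain
    simp only [hmain]
    rfl
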